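-- pv_equiv track=rewrite | github.com/AdamLatos/slimfly-gen | slimfly_gen.py | find_generator_sets
-- ===== SOURCE A (Python) =====
-- def find_generator_sets(q, primitive_elem):
--     X1 = [1]
--     X2 = []
--     for i in range(1,q-1):
--         elem = pow(primitive_elem, i) % q
--         if i % 2 == 0:
--             X1.append(elem)
--         else:
--             X2.append(elem)
--     return (X1, X2)
-- ===== SOURCE B (Python) =====
-- def find_generator_sets(q, primitive_elem):
--     X1 = [1]
--     X2 = []
--     if q > 2:
--         p = primitive_elem % q
--         n = q - 2              # exponents 1 .. n
--         e = p                  # running power: primitive_elem**i % q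
--         for _ in range(n // 2):
--             X2.append(e)
--             e = e * p % q
--             X1.append(e)
--             e = e * p % q
--         if n % 2:
--             X2.append(e)
--     return (X1, X2)
-- ===== Notes on version B (the rewrite author's own statement) =====
-- stated objective: faster
-- what changed: Instead of recomputing the full big integer pow(primitive_elem, i) and reducing mod q at every iteration with a parity branch, B keeps a running power e = e*p % q (p = primitive_elem % q reduced once) and consumes exponents two at a time, appending straight to X2 then X1 with a single trailing odd-exponent step, so the parity test and the repeated exponentiation disappear.
import Mathlib
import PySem

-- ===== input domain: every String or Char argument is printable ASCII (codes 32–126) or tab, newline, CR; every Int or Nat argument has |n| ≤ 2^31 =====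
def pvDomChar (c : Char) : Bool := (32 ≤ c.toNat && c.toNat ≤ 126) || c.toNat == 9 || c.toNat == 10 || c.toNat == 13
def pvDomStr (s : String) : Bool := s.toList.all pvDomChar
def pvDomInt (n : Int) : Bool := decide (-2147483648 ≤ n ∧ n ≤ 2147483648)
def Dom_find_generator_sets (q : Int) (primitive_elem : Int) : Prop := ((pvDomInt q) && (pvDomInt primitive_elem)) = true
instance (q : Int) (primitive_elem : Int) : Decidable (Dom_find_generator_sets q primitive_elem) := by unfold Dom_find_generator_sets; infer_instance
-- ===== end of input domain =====

-- B replaces A's per-iteration big-integer pow(primitive_elem, i) % q and parity branch with a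
-- running power e = e*p % q consumed two exponents at a time (objective: faster).

-- ===== PORT A =====
-- one loop iteration of A: elem = pow(primitive_elem, i) % q; parity branch
def fgsStep (q primitive_elem : Int) (s : List Int × List Int) (i : Int) : List Int × List Int :=
  let elem := PySem.Int.mod (primitive_elem ^ i.toNat) q
  if PySem.Int.mod i 2 = 0 then (s.1 ++ [elem], s.2) else (s.1, s.2 ++ [elem])

def find_generator_sets (q : Int) (primitive_elem : Int) : List (List Int) :=
  let s := (PySem.List.pyRange 1 (q - 1) 1).foldl (fgsStep q primitive_elem) ([1], [])
  [s.1, s.2]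

-- ===== PORT B =====
-- B's for-loop over range(n // 2): returns (e, X1, X2) after the loop
def fgsPairLoop (q p : Int) : Nat → Int → List Int → List Int → Int × List Int × List Int
  | 0, e, x1, x2 => (e, x1, x2)
  | k + 1, e, x1, x2 =>
    let x2' := x2 ++ [e]
    let e1 := PySem.Int.mod (e * p) q
    let x1' := x1 ++ [e1]
    fgsPairLoop q p k (PySem.Int.mod (e1 * p) q) x1' x2'

def find_generator_sets_alt (q : Int) (primitive_elem : Int) : List (List Int) :=
  if 2 < q then
    let p := PySem.Int.mod primitive_elem q
    let n := (q - 2).toNat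
    match fgsPairLoop q p (n / 2) p [1] [] with
    | (e, x1, x2) => if n % 2 = 1 then [x1, x2 ++ [e]] else [x1, x2]
  else [[1], []]

-- ===== PRECONDITION & SPEC =====
def Spec_find_generator_sets (q : Int) (primitive_elem : Int) (out : List (List Int)) : Prop := out = find_generator_sets_alt q primitive_elem
instance (q : Int) (primitive_elem : Int) (out : List (List Int)) : Decidable (Spec_find_generator_sets q primitive_elem out) := by unfold Spec_find_generator_sets; infer_instance

-- ===== CLAIM (what is proved, stated in full; the proofs are below) =====
def Claim_equal_find_generator_sets : Prop := ∀ (q : Int) (primitive_elem : Int), Dom_find_generator_sets q primitive_elem → Spec_find_generator_sets q primitive_elem (find_generator_sets q primitive_elem)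

-- ===== LEMMAS AND PROOFS =====

-- chaining the running power: (pe^a % q) * (pe % q) % q = pe^(a+1) % q
theorem fgs_pow_step (q pe : Int) (a : Nat) :
    (pe ^ a % q) * (pe % q) % q = pe ^ (a + 1) % q := by
  rw [pow_succ]
  conv_rhs => rw [Int.mul_emod]

-- the pair loop simulates 2*k iterations of A's fold, starting at an odd exponent i
theorem fgsPairLoop_spec (q pe : Int) (hq : 2 < q) :
    ∀ (k : Nat) (i : Int) (x1 x2 : List Int), 1 ≤ i → i % 2 = 1 →
      fgsPairLoop q (PySem.Int.mod pe q) k (PySem.Int.mod (pe ^ i.toNat) q) x1 x2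
        = (PySem.Int.mod (pe ^ (i + 2 * k).toNat) q,
           (PySem.List.pyRange i (i + 2 * k) 1).foldl (fgsStep q pe) (x1, x2)) := by
  intro k
  induction k with
  | zero =>
    intro i x1 x2 hi hodd
    have hnil : PySem.List.pyRange i (i + 2 * ((0:Nat) : Int)) 1 = [] :=
      PySem.List.pyRange_one_eq_nil (by push_cast; omega)
    rw [hnil]; simp [fgsPairLoop]
  | succ k ih =>
    intro i x1 x2 hi hodd
    have hq0 : (0:Int) < q := by omega
    have hmods : ∀ a : Int, PySem.Int.mod a q = a % q := fun a =>
      PySem.Int.mod_eq_emod_of_pos hq0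
    have hlt1 : i < i + 2 * ((k+1 : Nat) : Int) := by push_cast; omega
    have hlt2 : i + 1 < i + 2 * ((k+1 : Nat) : Int) := by push_cast; omega
    have hcons1 : PySem.List.pyRange i (i + 2 * (k+1 : Nat)) 1
        = i :: PySem.List.pyRange (i+1) (i + 2 * (k+1 : Nat)) 1 :=
      PySem.List.pyRange_one_cons hlt1
    have hcons2 : PySem.List.pyRange (i+1) (i + 2 * (k+1 : Nat)) 1
        = (i+1) :: PySem.List.pyRange (i+2) (i + 2 * (k+1 : Nat)) 1 := by
      have h := PySem.List.pyRange_one_cons hlt2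
      rwa [show i + 1 + 1 = i + 2 from by ring] at h
    have hiodd : ¬ PySem.Int.mod i 2 = 0 := by
      rw [PySem.Int.mod_eq_emod_of_pos (by omega : (0:Int) < 2)]; omega
    have hieven : PySem.Int.mod (i+1) 2 = 0 := by
      rw [PySem.Int.mod_eq_emod_of_pos (by omega : (0:Int) < 2)]; omega
    have hstep1 : fgsStep q pe (x1, x2) i
        = (x1, x2 ++ [PySem.Int.mod (pe ^ i.toNat) q]) := by
      simp only [fgsStep, if_neg hiodd]
    have he1 : PySem.Int.mod (PySem.Int.mod (pe ^ i.toNat) q * PySem.Int.mod pe q) q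
        = PySem.Int.mod (pe ^ (i+1).toNat) q := by
      simp only [hmods]
      rw [show (i+1).toNat = i.toNat + 1 from by omega]
      exact fgs_pow_step q pe i.toNat
    have he2 : PySem.Int.mod (PySem.Int.mod (pe ^ (i+1).toNat) q * PySem.Int.mod pe q) q
        = PySem.Int.mod (pe ^ (i+2).toNat) q := by
      simp only [hmods]
      rw [show (i+2).toNat = (i+1).toNat + 1 from by omega]
      exact fgs_pow_step q pe (i+1).toNat
    have hstep2 : fgsStep q pe (x1, x2 ++ [PySem.Int.mod (pe ^ i.toNat) q]) (i+1)
        = (x1 ++ [PySem.Int.mod (pe ^ (i+1).toNat) q], x2 ++ [PySem.Int.mod (pe ^ i.toNat) q]) := by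
      simp only [fgsStep, if_pos hieven]
    have hrec := ih (i+2) (x1 ++ [PySem.Int.mod (pe ^ (i+1).toNat) q])
      (x2 ++ [PySem.Int.mod (pe ^ i.toNat) q]) (by omega) (by omega)
    calc fgsPairLoop q (PySem.Int.mod pe q) (k+1) (PySem.Int.mod (pe ^ i.toNat) q) x1 x2
        = fgsPairLoop q (PySem.Int.mod pe q) k (PySem.Int.mod (pe ^ (i+2).toNat) q)
            (x1 ++ [PySem.Int.mod (pe ^ (i+1).toNat) q])
            (x2 ++ [PySem.Int.mod (pe ^ i.toNat) q]) := by
          simp only [fgsPairLoop, he1, he2]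
      _ = (PySem.Int.mod (pe ^ (i + 2 + 2 * k).toNat) q,
           (PySem.List.pyRange (i+2) (i + 2 + 2 * k) 1).foldl (fgsStep q pe)
             (x1 ++ [PySem.Int.mod (pe ^ (i+1).toNat) q], x2 ++ [PySem.Int.mod (pe ^ i.toNat) q])) := hrec
      _ = (PySem.Int.mod (pe ^ (i + 2 * (k+1 : Nat)).toNat) q,
           (PySem.List.pyRange i (i + 2 * (k+1 : Nat)) 1).foldl (fgsStep q pe) (x1, x2)) := by
          have hc : i + 2 * ((k+1 : Nat) : Int) = i + 2 + 2 * (k : Nat) := by push_cast; ring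
          rw [hc] at hcons1 hcons2
          rw [hc, hcons1, hcons2]
          simp only [List.foldl_cons, hstep1, hstep2]

-- ===== VERDICT (by name: the statement is the Claim_ definition above) =====
theorem find_generator_sets_spec : Claim_equal_find_generator_sets := by
  intro q pe _
  unfold Spec_find_generator_sets find_generator_sets find_generator_sets_alt
  by_cases hq : 2 < q
  · simp only [if_pos hq]
    set n := (q - 2).toNat with hn
    have hmain := fgsPairLoop_spec q pe hq (n / 2) 1 [1] [] (le_refl 1) (by decide)
    norm_num at hmain
    rcases Nat.mod_two_eq_zero_or_one n with hmod | hmod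
    · rw [show (q - 1 : Int) = 1 + 2 * ((n / 2 : Nat) : Int) by omega, hmain]
      simp [hmod]
    · rw [show (q - 1 : Int) = (1 + 2 * ((n / 2 : Nat) : Int)) + 1 by omega,
        PySem.List.pyRange_one_succ_right (by push_cast; omega), List.foldl_append, hmain]
      have hlodd : PySem.Int.mod (1 + 2 * ((n / 2 : Nat) : Int)) 2 = 1 := by
        rw [PySem.Int.mod_eq_emod_of_pos (by omega : (0:Int) < 2)]; omega
      simp only [List.foldl_cons, List.foldl_nil, fgsStep, hlodd]
      simp [hmod]
  · have hnil : PySem.List.pyRange 1 (q - 1) 1 = [] :=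
      PySem.List.pyRange_one_eq_nil (by omega)
    simp [hnil, if_neg hq]
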